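-- pv_equiv track=rewrite | github.com/Sameer200510/samaysudarshan-v2 | backend/timetable_ga/initializer.py | _block_starts
-- ===== SOURCE A (Python) =====
-- from typing import Dict, List, Set
--
-- def _block_starts(usable: Set[int], pday: int, block_size: int):
--     """Yield valid starts where a block fully fits inside usable slots."""
--     if not usable or pday <= 0:
--         return
--     usable_sorted = sorted(usable)
--     max_slot = max(usable_sorted)
--     days = (max_slot + pday - 1) // pday
--
--     for d in range(days):
--         base = d * pday
--         for s in range(1, pday - block_size + 2):
--             block = {base + s + k for k in range(block_size)}
--             if block.issubset(usable):
--                 yield base + s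
-- ===== SOURCE B (Python) =====
-- def _block_starts(usable, pday, block_size):
--     """Yield valid starts where a block fully fits inside usable slots.
--
--     Single run-length scan per day: `run` is the length of the run of
--     usable slots ending at the current slot; a block of block_size slots
--     ends here exactly when run reaches block_size.
--     """
--     if not usable or pday <= 0 or block_size <= 0:
--         return
--     U = set(usable)
--     days = (max(usable) + pday - 1) // pday
--     for d in range(days):
--         base = d * pday
--         run = 0
--         for s in range(1, pday + 1):
--             run = run + 1 if base + s in U else 0
--             if run >= block_size:
--                 yield base + s - block_size + 1
-- ===== Notes on version B (the rewrite author's own statement) =====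
-- stated objective: alternative
-- what changed: Replaces the per-start block-set construction and subset test by a single run-length scan of each day's slots that emits a start whenever the run of consecutive usable slots reaches block_size; Pre_ excludes the degenerate inputs with block_size <= 0 whose loops actually run (usable nonempty with a slot >= 1, pday >= 1), outside the task's natural domain, where A's empty block is vacuously a subset of anything so A yields every candidate start while B yields nothing.
-- outside the precondition, e.g. on _block_starts({1, 2}, 2, 0): A returns [1, 2, 3], B returns []; on _block_starts({1, 2, 3}, 3, -1): A returns [1, 2, 3, 4, 5], B returns []
import Mathlib
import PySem

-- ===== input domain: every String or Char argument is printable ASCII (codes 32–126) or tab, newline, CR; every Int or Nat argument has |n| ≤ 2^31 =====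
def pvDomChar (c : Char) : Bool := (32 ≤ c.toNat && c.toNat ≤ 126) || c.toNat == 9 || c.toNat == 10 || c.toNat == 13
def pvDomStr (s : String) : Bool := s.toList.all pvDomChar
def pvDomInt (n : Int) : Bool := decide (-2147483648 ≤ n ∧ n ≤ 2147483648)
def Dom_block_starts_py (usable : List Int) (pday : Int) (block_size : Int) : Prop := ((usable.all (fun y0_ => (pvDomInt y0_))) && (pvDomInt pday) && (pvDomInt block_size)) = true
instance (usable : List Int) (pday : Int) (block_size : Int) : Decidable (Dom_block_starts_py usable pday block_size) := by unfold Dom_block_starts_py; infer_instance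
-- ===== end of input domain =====

-- B replaces A's per-start block-set construction + subset test by a single run-length
-- scan of each day's slots (objective: alternative algorithm, same values on Pre_).

-- ===== PORT A =====
def block_starts_py (usable : List Int) (pday : Int) (block_size : Int) : List Int :=
  if usable = [] ∨ pday ≤ 0 then []
  else
    let usable_sorted := PySem.List.sorted usable (fun x => x) false
    match PySem.List.max? usable_sorted (fun x => x) with
    | none => []
    | some max_slot =>
      let days := PySem.Int.floordiv (max_slot + pday - 1) pday
      (PySem.List.pyRange 0 days 1).foldl (fun acc d =>
        let base := d * pday
        (PySem.List.pyRange 1 (pday - block_size + 2) 1).foldl (fun acc2 s =>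
          if PySem.Set.issubset
               (PySem.Set.ofList ((PySem.List.pyRange 0 block_size 1).map (fun k => base + s + k)))
               usable
          then acc2 ++ [base + s] else acc2) acc) []

-- ===== PORT B =====
-- one day of B's run-length scan: `run` = length of the usable run ending at the current slot
def pvAltDay (U : PySem.Set Int) (pday : Int) (block_size : Int) (base : Int) : List Int :=
  ((PySem.List.pyRange 1 (pday + 1) 1).foldl
    (fun st s =>
      let run := if PySem.Set.contains U (base + s) then st.1 + 1 else 0
      (run, if block_size ≤ run then st.2 ++ [base + s - block_size + 1] else st.2))
    ((0 : Int), ([] : List Int))).2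

def block_starts_py_alt (usable : List Int) (pday : Int) (block_size : Int) : List Int :=
  if usable = [] ∨ pday ≤ 0 ∨ block_size ≤ 0 then []
  else
    let U := PySem.Set.ofList usable
    match PySem.List.max? usable (fun x => x) with
    | none => []
    | some m =>
      let days := PySem.Int.floordiv (m + pday - 1) pday
      (PySem.List.pyRange 0 days 1).foldl (fun acc d =>
        acc ++ pvAltDay U pday block_size (d * pday)) []

-- ===== PRECONDITION & SPEC =====
-- Pre_ excludes the degenerate inputs where block_size ≤ 0 and A's loops actually run
-- (usable nonempty with a slot ≥ 1, pday ≥ 1): a non-positive block size is outside the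
-- task's natural domain, and there the empty block is vacuously a subset of anything, so
-- A yields every candidate start (even past the day's end) while B naturally yields nothing.
def Pre_block_starts_py (usable : List Int) (pday : Int) (block_size : Int) : Prop :=
  1 ≤ block_size ∨ usable = [] ∨ pday ≤ 0 ∨ usable.all (fun x => x ≤ 0) = true
instance (usable : List Int) (pday : Int) (block_size : Int) : Decidable (Pre_block_starts_py usable pday block_size) := by unfold Pre_block_starts_py; infer_instance

def pvWitness_block_starts_py : List Int × Int × Int := ([1, 2, 3, 5], 3, 2)

def Spec_block_starts_py (usable : List Int) (pday : Int) (block_size : Int) (out : List Int) : Prop := out = block_starts_py_alt usable pday block_size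
instance (usable : List Int) (pday : Int) (block_size : Int) (out : List Int) : Decidable (Spec_block_starts_py usable pday block_size out) := by unfold Spec_block_starts_py; infer_instance

-- ===== CLAIM (what is proved, stated in full; the proofs are below) =====
def Claim_equal_block_starts_py : Prop := ∀ (usable : List Int) (pday : Int) (block_size : Int), Dom_block_starts_py usable pday block_size → Pre_block_starts_py usable pday block_size → Spec_block_starts_py usable pday block_size (block_starts_py usable pday block_size)

-- ===== LEMMAS AND PROOFS =====

-- max over the sorted copy = max over the original list (A computes max(sorted(usable)))
theorem pv_max_sorted (usable : List Int) :
    PySem.List.max? (PySem.List.sorted usable (fun x => x) false) (fun x => x)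
      = PySem.List.max? usable (fun x => x) := by
  rcases h1 : PySem.List.max? (PySem.List.sorted usable (fun x => x) false) (fun x => x) with _ | a
  · rw [PySem.List.max?_eq_none_iff] at h1
    rw [PySem.List.sorted_eq_nil_iff] at h1
    rw [eq_comm, PySem.List.max?_eq_none_iff]; exact h1
  · rcases h2 : PySem.List.max? usable (fun x => x) with _ | b
    · rw [PySem.List.max?_eq_none_iff] at h2
      subst h2
      have hs : PySem.List.sorted ([] : List Int) (fun x => x) false = [] := by
        rw [PySem.List.sorted_eq_nil_iff]
      have hn : PySem.List.max? ([] : List Int) (fun x => x) = none := by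
        rw [PySem.List.max?_eq_none_iff]
      rw [hs, hn] at h1
      exact absurd h1 (by simp)
    · have ha := PySem.List.max?_mem h1
      have hb := PySem.List.max?_mem h2
      rw [PySem.List.mem_sorted] at ha
      have h3 := PySem.List.max?_isMax h1 b (by rw [PySem.List.mem_sorted]; exact hb)
      have h4 := PySem.List.max?_isMax h2 a ha
      have : a = b := le_antisymm (by simpa using h4) (by simpa using h3)
      rw [this]

-- the run length ending at slot n (B's `run` variable after processing slot n)
def pvRun (U : PySem.Set Int) (base : Int) : Nat → Int
  | 0 => 0
  | n+1 => if PySem.Set.contains U (base + ((n : Int) + 1)) then pvRun U base n + 1 else 0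

theorem pvRun_nonneg (U : PySem.Set Int) (base : Int) (n : Nat) : 0 ≤ pvRun U base n := by
  induction n with
  | zero => simp [pvRun]
  | succ k ihk => simp only [pvRun]; split <;> omega

-- characterisation of the running-run counter
theorem pvRun_ge_iff (U : PySem.Set Int) (base : Int) (n : Nat) (j : Int) (hj : 1 ≤ j) :
    j ≤ pvRun U base n ↔ (j ≤ (n : Int) ∧ ∀ i : Int, 0 ≤ i → i < j → base + (n : Int) - i ∈ U) := by
  induction n generalizing j with
  | zero =>
    simp only [pvRun, Nat.cast_zero]
    constructor
    · intro h; exact absurd h (by omega)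
    · rintro ⟨h1, -⟩; exact absurd h1 (by omega)
  | succ n ih =>
    simp only [pvRun]
    by_cases hm : PySem.Set.contains U (base + ((n : Int) + 1)) = true
    · rw [if_pos hm]
      rw [PySem.Set.contains_iff] at hm
      push_cast
      by_cases hj1 : j = 1
      · subst hj1
        have hnn : (0 : Int) ≤ pvRun U base n := pvRun_nonneg U base n
        constructor
        · intro _
          refine ⟨by omega, fun i h0 h1 => ?_⟩
          have : i = 0 := by omega
          subst this; simpa using hm
        · intro _; omega
      · have hj2 : (1 : Int) ≤ j - 1 := by omega
        have := ih (j - 1) hj2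
        constructor
        · intro h
          have h' : j - 1 ≤ pvRun U base n := by omega
          obtain ⟨hle, hall⟩ := this.mp h'
          refine ⟨by omega, fun i h0 hi => ?_⟩
          by_cases hi0 : i = 0
          · subst hi0; simpa using hm
          · have := hall (i - 1) (by omega) (by omega)
            have e : base + (n : Int) - (i - 1) = base + ((n : Int) + 1) - i := by ring
            rwa [e] at this
        · rintro ⟨hle, hall⟩
          have h' : j - 1 ≤ pvRun U base n := by
            refine this.mpr ⟨by omega, fun i h0 hi => ?_⟩
            have := hall (i + 1) (by omega) (by omega)
            have e : base + ((n : Int) + 1) - (i + 1) = base + (n : Int) - i := by ring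
            rwa [e] at this
          omega
    · rw [if_neg hm]
      push_cast
      constructor
      · intro h; exact absurd h (by omega)
      · rintro ⟨-, hall⟩
        have := hall 0 le_rfl (by omega)
        rw [PySem.Set.contains_iff] at hm
        simp at this
        exact absurd this hm

-- "a block of size bs starting at s fits": A's subset condition, as a Bool over U
def pvFitsB (U : PySem.Set Int) (bs base s : Int) : Bool :=
  (PySem.List.pyRange 0 bs 1).all (fun k => PySem.Set.contains U (base + s + k))

theorem pvFitsB_iff (U : PySem.Set Int) (bs base s : Int) :
    pvFitsB U bs base s = true ↔ ∀ k : Int, 0 ≤ k → k < bs → base + s + k ∈ U := by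
  simp [pvFitsB, PySem.List.mem_pyRange_one]

-- loop invariant for one day of B's scan
theorem pv_day_inv (U : PySem.Set Int) (bs base : Int) (hbs : 1 ≤ bs) (n : Nat) (acc : List Int) :
    (PySem.List.pyRange 1 ((n : Int) + 1) 1).foldl
      (fun st s =>
        let run := if PySem.Set.contains U (base + s) then st.1 + 1 else 0
        (run, if bs ≤ run then st.2 ++ [base + s - bs + 1] else st.2))
      ((0 : Int), acc)
    = (pvRun U base n,
       acc ++ ((PySem.List.pyRange 1 ((n : Int) - bs + 2) 1).filter (pvFitsB U bs base)).map
                (fun s => base + s)) := by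
  induction n with
  | zero =>
    rw [show ((0:Nat):Int) + 1 = 1 by norm_num, PySem.List.pyRange_one_eq_nil le_rfl]
    rw [PySem.List.pyRange_one_eq_nil (by push_cast; omega)]
    simp [pvRun]
  | succ n ih =>
    have hcast : (((n+1 : Nat)) : Int) + 1 = ((n : Int) + 1) + 1 := by push_cast; ring
    rw [hcast, PySem.List.pyRange_one_succ_right (by omega), List.foldl_append, ih]
    simp only [List.foldl_cons, List.foldl_nil]
    have hrun : (if PySem.Set.contains U (base + ((n : Int) + 1)) then pvRun U base n + 1 else 0)
        = pvRun U base (n+1) := by simp only [pvRun]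
    simp only [hrun]
    by_cases hc : bs ≤ (n : Int) + 1
    · have hsplit : PySem.List.pyRange 1 (((n+1 : Nat) : Int) - bs + 2) 1
          = PySem.List.pyRange 1 ((n : Int) - bs + 2) 1 ++ [(n : Int) - bs + 2] := by
        rw [show ((n+1 : Nat) : Int) - bs + 2 = ((n : Int) - bs + 2) + 1 by push_cast; ring]
        exact PySem.List.pyRange_one_succ_right (by omega)
      rw [hsplit, List.filter_append, List.map_append]
      have hiff : bs ≤ pvRun U base (n+1) ↔ pvFitsB U bs base ((n : Int) - bs + 2) = true := by
        rw [pvRun_ge_iff U base (n+1) bs hbs, pvFitsB_iff]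
        push_cast
        constructor
        · rintro ⟨-, hall⟩ k h0 hk
          have := hall (bs - 1 - k) (show (0:Int) ≤ bs - 1 - k by omega)
            (show bs - 1 - k < bs by omega)
          have e : base + ((n:Int) + 1) - (bs - 1 - k) = base + ((n:Int) - bs + 2) + k := by ring
          rwa [e] at this
        · intro hall
          refine ⟨hc, fun i h0 hi => ?_⟩
          have := hall (bs - 1 - i) (show (0:Int) ≤ bs - 1 - i by omega)
            (show bs - 1 - i < bs by omega)
          have e : base + ((n:Int) - bs + 2) + (bs - 1 - i) = base + ((n:Int) + 1) - i := by ring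
          rwa [e] at this
      by_cases hfit : pvFitsB U bs base ((n : Int) - bs + 2) = true
      · have he : base + ((n : Int) + 1) - bs + 1 = base + ((n : Int) - bs + 2) := by ring
        rw [if_pos (hiff.mpr hfit), List.filter_cons_of_pos hfit, he]
        simp [List.append_assoc]
      · rw [if_neg (fun h => hfit (hiff.mp h)), List.filter_cons_of_neg (by simpa using hfit)]
        simp
    · have h1 : PySem.List.pyRange 1 (((n+1 : Nat) : Int) - bs + 2) 1 = [] :=
        PySem.List.pyRange_one_eq_nil (by push_cast; omega)
      have h2 : PySem.List.pyRange 1 ((n : Int) - bs + 2) 1 = [] :=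
        PySem.List.pyRange_one_eq_nil (by omega)
      have hno : ¬ bs ≤ pvRun U base (n+1) := by
        rw [pvRun_ge_iff U base (n+1) bs hbs]
        push_cast
        rintro ⟨h, -⟩; omega
      rw [if_neg hno, h1, h2]

-- A's subset test equals pvFitsB over U = set(usable)
theorem pv_cond_eq (usable : List Int) (bs base s : Int) :
    PySem.Set.issubset
        (PySem.Set.ofList ((PySem.List.pyRange 0 bs 1).map (fun k => base + s + k)))
        usable
      = pvFitsB (PySem.Set.ofList usable) bs base s := by
  rw [Bool.eq_iff_iff, pvFitsB_iff, PySem.Set.issubset_iff]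
  simp only [PySem.Set.mem_ofList, List.mem_map, PySem.List.mem_pyRange_one]
  constructor
  · intro h k h0 hk
    exact h _ ⟨k, ⟨h0, hk⟩, rfl⟩
  · rintro h x ⟨k, ⟨h0, hk⟩, rfl⟩
    exact h k h0 hk

-- one day of A equals one day of B (positive block size)
theorem pv_day_eq (usable : List Int) (pday bs base : Int)
    (hp : 0 < pday) (hbs : 1 ≤ bs) (acc : List Int) :
    (PySem.List.pyRange 1 (pday - bs + 2) 1).foldl (fun acc2 s =>
        if PySem.Set.issubset
             (PySem.Set.ofList ((PySem.List.pyRange 0 bs 1).map (fun k => base + s + k)))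
             usable
        then acc2 ++ [base + s] else acc2) acc
    = acc ++ pvAltDay (PySem.Set.ofList usable) pday bs base := by
  have hA : (PySem.List.pyRange 1 (pday - bs + 2) 1).foldl (fun acc2 s =>
        if PySem.Set.issubset
             (PySem.Set.ofList ((PySem.List.pyRange 0 bs 1).map (fun k => base + s + k)))
             usable
        then acc2 ++ [base + s] else acc2) acc
      = acc ++ ((PySem.List.pyRange 1 (pday - bs + 2) 1).filter
          (pvFitsB (PySem.Set.ofList usable) bs base)).map (fun s => base + s) := by
    rw [PySem.List.foldl_append_if]
    congr 2
    apply List.filter_congr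
    intro s _
    exact pv_cond_eq usable bs base s
  rw [hA]
  unfold pvAltDay
  have hn : ((pday.toNat : Int)) = pday := Int.toNat_of_nonneg (le_of_lt hp)
  rw [show pday + 1 = ((pday.toNat : Int)) + 1 by rw [hn]]
  rw [pv_day_inv (PySem.Set.ofList usable) bs base hbs pday.toNat []]
  simp only [List.nil_append, hn]

-- ===== VERDICT (by name: the statement is the Claim_ definition above) =====
theorem block_starts_py_spec : Claim_equal_block_starts_py := by
  intro usable pday block_size _ hpre
  unfold Pre_block_starts_py at hpre
  unfold Spec_block_starts_py block_starts_py block_starts_py_alt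
  by_cases h0 : usable = [] ∨ pday ≤ 0
  · rw [if_pos h0, if_pos (by tauto)]
  · push_neg at h0
    obtain ⟨hne, hp⟩ := h0
    by_cases hbs : block_size ≤ 0
    · -- Pre_ then forces every usable slot ≤ 0, hence days ≤ 0 and A returns []
      have hall : usable.all (fun x => x ≤ 0) = true := by
        rcases hpre with h | h | h | h
        · omega
        · exact absurd h hne
        · omega
        · exact h
      rw [if_neg (by push_neg; exact ⟨hne, hp⟩), if_pos (Or.inr (Or.inr hbs))]
      simp only [pv_max_sorted]
      rcases hmax : PySem.List.max? usable (fun x => x) with _ | m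
      · rfl
      · dsimp only
        have hm : m ≤ 0 := by
          simp only [List.all_eq_true, decide_eq_true_eq] at hall
          exact hall m (PySem.List.max?_mem hmax)
        have hdays : PySem.Int.floordiv (m + pday - 1) pday ≤ 0 := by
          by_contra hc
          have h1 : (1 : Int) ≤ PySem.Int.floordiv (m + pday - 1) pday := by omega
          rw [PySem.Int.le_floordiv_iff_mul_le hp] at h1
          omega
        rw [PySem.List.pyRange_one_eq_nil hdays]
        rfl
    · rw [if_neg (by push_neg; exact ⟨hne, hp⟩), if_neg (by push_neg; exact ⟨hne, hp, by omega⟩)]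
      simp only [pv_max_sorted]
      rcases hmax : PySem.List.max? usable (fun x => x) with _ | m
      · rfl
      · dsimp only
        apply PySem.List.foldl_congr_mem
        intro acc d _
        exact pv_day_eq usable pday block_size (d * pday) hp (by omega) acc
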